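-- pv_equiv track=rewrite | github.com/eateren/advent-of-code-2020 | 13/aoc2020-13.py | findBus
-- ===== SOURCE A (Python) =====
-- def findBus(busTable):
--
--     busArrivals = []
--     busList = []
--
--     for busTimes in busTable:
--
--         busList.append(busTimes[0])
--         busArrivals.append(busTimes[-1])
--
--     minTime = min(busArrivals)
--
--
--     return minTime, busList[busArrivals.index(minTime)]
-- ===== SOURCE B (Python) =====
-- def findBus(busTable):
--     winner = min(busTable, key=lambda bus: bus[-1])
--     return winner[-1], winner[0]
-- ===== Notes on version B (the rewrite author's own statement) =====
-- stated objective: idiomatic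
-- what changed: Replaced the two parallel list-building loops plus min()/index()/lookup (three extra passes over derived lists) with a single min(busTable, key=last) selection over the table itself, reading both fields off the winning entry.
import Mathlib
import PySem

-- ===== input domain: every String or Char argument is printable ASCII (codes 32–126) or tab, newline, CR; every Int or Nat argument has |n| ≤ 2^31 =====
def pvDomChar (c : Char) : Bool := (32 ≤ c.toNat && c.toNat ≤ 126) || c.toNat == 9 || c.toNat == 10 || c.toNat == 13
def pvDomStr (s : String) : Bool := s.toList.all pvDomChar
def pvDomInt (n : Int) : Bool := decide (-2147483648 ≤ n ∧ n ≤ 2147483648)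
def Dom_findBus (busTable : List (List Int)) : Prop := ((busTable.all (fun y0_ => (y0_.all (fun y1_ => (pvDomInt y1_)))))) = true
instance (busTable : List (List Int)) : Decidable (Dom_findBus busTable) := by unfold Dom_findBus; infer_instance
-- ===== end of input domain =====

-- B replaces A's two parallel list builds + min()/index()/lookup with a single min(key=last) over the table (idiomatic, one pass).

-- ===== PORT A =====
def findBus (busTable : List (List Int)) : Int × Int :=
  let st := busTable.foldl
    (fun (acc : List Int × List Int) busTimes =>
      (acc.1 ++ [PySem.List.pyGetD busTimes 0 0], acc.2 ++ [PySem.List.pyGetD busTimes (-1) 0]))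
    ([], [])
  let minTime := (PySem.List.min? st.2 (fun x => x)).getD 0
  (minTime, PySem.List.pyGetD st.1 (((PySem.List.index? st.2 minTime).getD 0 : Nat) : Int) 0)

-- ===== PORT B =====
def findBus_alt (busTable : List (List Int)) : Int × Int :=
  match PySem.List.min? busTable (fun bus => PySem.List.pyGetD bus (-1) 0) with
  | none => (0, 0)
  | some winner => (PySem.List.pyGetD winner (-1) 0, PySem.List.pyGetD winner 0 0)

-- ===== PRECONDITION & SPEC =====
-- Pre_ excludes exactly the inputs on which A raises: an empty table (ValueError from min)
-- and a table containing an empty row (IndexError from busTimes[0]/busTimes[-1]).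
def Pre_findBus (busTable : List (List Int)) : Prop :=
  busTable ≠ [] ∧ ∀ row ∈ busTable, row ≠ []
instance (busTable : List (List Int)) : Decidable (Pre_findBus busTable) := by
  unfold Pre_findBus; infer_instance

def pvWitness_findBus : List (List Int) := [[7, 9], [5, 13], [13, 9]]

def Spec_findBus (busTable : List (List Int)) (out : Int × Int) : Prop := out = findBus_alt busTable
instance (busTable : List (List Int)) (out : Int × Int) : Decidable (Spec_findBus busTable out) := by unfold Spec_findBus; infer_instance

-- ===== CLAIM (what is proved, stated in full; the proofs are below) =====
def Claim_equal_findBus : Prop := ∀ (busTable : List (List Int)), Dom_findBus busTable → Pre_findBus busTable → Spec_findBus busTable (findBus busTable)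

-- ===== LEMMAS AND PROOFS =====

-- The body of Python's min-with-key fold, with an explicit accumulator.
def minLoop {α : Type} (g : α → Int) (acc : Option α) (xs : List α) : Option α :=
  xs.foldl (fun acc x => match acc with
    | none => some x
    | some m => if g x < g m then some x else some m) acc

lemma min?_eq_minLoop {α : Type} (g : α → Int) (xs : List α) :
    PySem.List.min? xs g = minLoop g none xs := rfl

-- min over the mapped key list (identity key) is the image of min with key.
lemma minLoop_map {α : Type} (g : α → Int) :
    ∀ (xs : List α) (acc : Option α),
      minLoop (fun y => y) (acc.map g) (xs.map g) = (minLoop g acc xs).map g := by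
  intro xs
  induction xs with
  | nil => intro acc; rfl
  | cons x t ih =>
    intro acc
    cases acc with
    | none =>
      show minLoop (fun y => y) (some (g x)) (t.map g) = (minLoop g (some x) t).map g
      exact ih (some x)
    | some m =>
      show minLoop (fun y => y) (if g x < g m then some (g x) else some (g m)) (t.map g)
          = (minLoop g (if g x < g m then some x else some m) t).map g
      by_cases h : g x < g m
      · rw [if_pos h, if_pos h]; exact ih (some x)
      · rw [if_neg h, if_neg h]; exact ih (some m)

-- The winner of the fold: either the accumulator survives or the winner appears in
-- the list, strictly beats the accumulator and everything before it, and is ≤ after.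
lemma minLoop_first {α : Type} (g : α → Int) :
    ∀ (t : List α) (m : α),
      (minLoop g (some m) t = some m ∧ ∀ y ∈ t, g m ≤ g y) ∨
      (∃ pre w suf, t = pre ++ w :: suf ∧ minLoop g (some m) t = some w ∧
        g w < g m ∧ (∀ y ∈ pre, g w < g y) ∧ (∀ y ∈ suf, g w ≤ g y)) := by
  intro t
  induction t with
  | nil => intro m; left; exact ⟨rfl, by simp⟩
  | cons x t ih =>
    intro m
    by_cases h : g x < g m
    · have hloop : minLoop g (some m) (x :: t) = minLoop g (some x) t := by
        simp [minLoop, List.foldl_cons, h]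
      rcases ih x with ⟨hres, hle⟩ | ⟨pre, w, suf, hdec, hres, hlt, hpre, hsuf⟩
      · right
        exact ⟨[], x, t, by simp, by rw [hloop]; exact hres, h, by simp, hle⟩
      · right
        refine ⟨x :: pre, w, suf, by simp [hdec], by rw [hloop]; exact hres,
          lt_trans hlt h, ?_, hsuf⟩
        intro y hy
        rcases List.mem_cons.mp hy with rfl | hy
        · exact hlt
        · exact hpre y hy
    · have hloop : minLoop g (some m) (x :: t) = minLoop g (some m) t := by
        simp [minLoop, List.foldl_cons, h]
      rcases ih m with ⟨hres, hle⟩ | ⟨pre, w, suf, hdec, hres, hlt, hpre, hsuf⟩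
      · left
        refine ⟨by rw [hloop]; exact hres, ?_⟩
        intro y hy
        rcases List.mem_cons.mp hy with rfl | hy
        · exact le_of_not_gt h
        · exact hle y hy
      · right
        refine ⟨x :: pre, w, suf, by simp [hdec], by rw [hloop]; exact hres, hlt, ?_, hsuf⟩
        intro y hy
        rcases List.mem_cons.mp hy with rfl | hy
        · exact lt_of_lt_of_le hlt (le_of_not_gt h)
        · exact hpre y hy

-- The first-minimum decomposition of a nonempty list.
lemma min?_first_decomp {α : Type} (g : α → Int) (x : α) (t : List α) :
    ∃ pre w suf, x :: t = pre ++ w :: suf ∧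
      PySem.List.min? (x :: t) g = some w ∧
      (∀ y ∈ pre, g w < g y) ∧ (∀ y ∈ suf, g w ≤ g y) := by
  have hx : PySem.List.min? (x :: t) g = minLoop g (some x) t := rfl
  rcases minLoop_first g t x with ⟨hres, hle⟩ | ⟨pre, w, suf, hdec, hres, hlt, hpre, hsuf⟩
  · exact ⟨[], x, t, by simp, by rw [hx]; exact hres, by simp, hle⟩
  · refine ⟨x :: pre, w, suf, by simp [hdec], by rw [hx]; exact hres, ?_, hsuf⟩
    intro y hy
    rcases List.mem_cons.mp hy with rfl | hy
    · exact hlt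
    · exact hpre y hy

-- ===== VERDICT (by name: the statement is the Claim_ definition above) =====
theorem findBus_spec : Claim_equal_findBus := by
  intro busTable _hDom hPre
  obtain ⟨hne, _hrows⟩ := hPre
  obtain ⟨x, t, rfl⟩ := List.exists_cons_of_ne_nil hne
  obtain ⟨pre, w, suf, hdec, hmin, hpre, hsuf⟩ :=
    min?_first_decomp (fun bus => PySem.List.pyGetD bus (-1) 0) x t
  -- the pair-building fold is the pair of maps
  have hbuild : (x :: t).foldl
      (fun (acc : List Int × List Int) busTimes =>
        (acc.1 ++ [PySem.List.pyGetD busTimes 0 0], acc.2 ++ [PySem.List.pyGetD busTimes (-1) 0]))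
      ([], []) =
      ((x :: t).map (fun bus => PySem.List.pyGetD bus 0 0),
       (x :: t).map (fun bus => PySem.List.pyGetD bus (-1) 0)) := by
    have h1 := PySem.List.foldl_prod_mk
      (fun (a : List Int) (bt : List Int) => a ++ [PySem.List.pyGetD bt 0 0])
      (fun (a : List Int) (bt : List Int) => a ++ [PySem.List.pyGetD bt (-1) 0])
      (x :: t) ([] : List Int) ([] : List Int)
    rw [PySem.List.foldl_append_singleton_eq_map, PySem.List.foldl_append_singleton_eq_map,
      List.nil_append, List.nil_append] at h1
    exact h1
  -- min over the arrivals list is the key of the winner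
  have hminArr : PySem.List.min?
      ((x :: t).map (fun bus => PySem.List.pyGetD bus (-1) 0)) (fun y => y)
      = some (PySem.List.pyGetD w (-1) 0) := by
    rw [min?_eq_minLoop]
    have hm := minLoop_map (fun bus => PySem.List.pyGetD bus (-1) 0) (x :: t) none
    simp only [Option.map_none] at hm
    rw [hm, ← min?_eq_minLoop, hmin, Option.map_some]
  -- index of the minimum value is the winner's position
  have hnotmem : PySem.List.pyGetD w (-1) 0 ∉
      pre.map (fun bus => PySem.List.pyGetD bus (-1) 0) := by
    intro hmem
    rcases List.mem_map.mp hmem with ⟨y, hy, hgy⟩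
    exact absurd hgy (ne_of_gt (hpre y hy))
  have hidx : PySem.List.index?
      ((x :: t).map (fun bus => PySem.List.pyGetD bus (-1) 0))
      (PySem.List.pyGetD w (-1) 0) = some pre.length := by
    rw [PySem.List.index?_eq_some_iff]
    exact ⟨pre.map (fun bus => PySem.List.pyGetD bus (-1) 0),
      suf.map (fun bus => PySem.List.pyGetD bus (-1) 0),
      by rw [hdec]; simp, by simp, hnotmem⟩
  -- the bus list at that position is the winner's first field
  have hget : PySem.List.pyGetD
      ((x :: t).map (fun bus => PySem.List.pyGetD bus 0 0))
      ((pre.length : Nat) : Int) 0 = PySem.List.pyGetD w 0 0 := by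
    rw [PySem.List.pyGetD_natCast, hdec, List.map_append, List.getD_eq_getElem?_getD,
      List.getElem?_append_right (by simp)]
    simp
  simp only [Spec_findBus, findBus, findBus_alt, hbuild, hminArr, hmin, hidx,
    Option.getD_some, hget]
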